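-- pv_equiv track=rewrite | github.com/hringbauer/BarrierInferPublic | grid.py | list_duplicates
-- ===== SOURCE A (Python) =====
-- def list_duplicates(seq):
--     '''Returns list of indices of all duplicate entries.
--     Only the first entry is '''
--     seen, result = [], []
--     for idx, item in enumerate(seq):
--         if item not in seen:
--             seen.append(item)  # First time seeing the element
--         else:
--             idx1 = seq.index(item)
--             result.append([idx1, idx])  # Already seen, add the index to the result
--     return result
-- ===== SOURCE B (Python) =====
-- def list_duplicates(seq):
--     '''Returns list of indices of all duplicate entries.
--     Only the first entry is '''
--     occ = {}
--     for i, x in enumerate(seq):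
--         occ.setdefault(x, []).append(i)
--     pairs = [[g[0], j] for g in occ.values() for j in g[1:]]
--     pairs.sort(key=lambda p: p[1])
--     return pairs
-- ===== Notes on version B (the rewrite author's own statement) =====
-- stated objective: alternative
-- what changed: Instead of scanning a growing 'seen' list and re-running seq.index per duplicate, B groups all occurrence indices per value in one dict-of-lists pass, emits [first, later] pairs group by group, and restores input order with a final sort on the duplicate index.
import Mathlib
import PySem

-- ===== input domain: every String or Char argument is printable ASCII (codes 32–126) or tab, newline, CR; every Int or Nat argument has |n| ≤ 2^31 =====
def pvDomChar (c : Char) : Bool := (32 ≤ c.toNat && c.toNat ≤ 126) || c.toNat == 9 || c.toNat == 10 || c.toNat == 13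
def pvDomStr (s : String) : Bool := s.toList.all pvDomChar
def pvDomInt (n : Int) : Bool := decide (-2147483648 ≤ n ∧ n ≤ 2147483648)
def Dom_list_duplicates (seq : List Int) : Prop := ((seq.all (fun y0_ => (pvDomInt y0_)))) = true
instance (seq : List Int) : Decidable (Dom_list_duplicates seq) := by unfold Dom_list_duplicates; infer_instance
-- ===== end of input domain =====

-- B replaces A's growing-'seen' scans and per-duplicate seq.index() rescans by grouping all
-- occurrence indices per value in one dict-of-lists pass, emitting [first, later] pairs group by
-- group, and restoring input order with a final sort on the duplicate index (objective: alternative).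

-- ===== PORT A =====
-- step of A's loop: state = (seen, result)
def ldStepA (seq : List Int) (st : List Int × List (List Int)) (p : Int × Int) :
    List Int × List (List Int) :=
  if p.2 ∉ st.1 then
    (st.1 ++ [p.2], st.2)            -- first time seeing the element
  else
    -- seq.index(item): item ∈ seen ⊆ seq here, so the lookup always succeeds
    match PySem.List.index? seq p.2 with
    | some idx1 => (st.1, st.2 ++ [[(idx1 : Int), p.1]])
    | none => (st.1, st.2)

def list_duplicates (seq : List Int) : List (List Int) :=
  ((PySem.List.enumerate seq 0).foldl (ldStepA seq) ([], [])).2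

-- ===== PORT B =====
def list_duplicates_alt (seq : List Int) : List (List Int) :=
  -- occ.setdefault(x, []).append(i)  ≡  occ[x] = occ.get(x, []) + [i]
  let occ := (PySem.List.enumerate seq 0).foldl
    (fun d p => d.modify p.2 [] (· ++ [p.1])) (PySem.Dict.empty : PySem.Dict Int (List Int))
  -- pairs = [[g[0], j] for g in occ.values() for j in g[1:]]  (g is never empty, so g[0] is total)
  let pairs := occ.values.flatMap (fun g =>
    (PySem.List.slice g (some 1) none).map (fun j => [PySem.List.pyGetD g 0 0, j]))
  -- pairs.sort(key=lambda p: p[1])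
  PySem.List.sorted pairs (fun p => PySem.List.pyGetD p 1 0) false

-- ===== PRECONDITION & SPEC =====
def Spec_list_duplicates (seq : List Int) (out : List (List Int)) : Prop := out = list_duplicates_alt seq
instance (seq : List Int) (out : List (List Int)) : Decidable (Spec_list_duplicates seq out) := by unfold Spec_list_duplicates; infer_instance

-- ===== CLAIM (what is proved, stated in full; the proofs are below) =====
def Claim_equal_list_duplicates : Prop := ∀ (seq : List Int), Dom_list_duplicates seq → Spec_list_duplicates seq (list_duplicates seq)

-- ===== LEMMAS AND PROOFS =====

-- 'x is a duplicate at position p': it already occurs in the prefix before p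
def ldC (seq : List Int) (p : Int × Int) : Bool := decide (p.2 ∈ seq.take p.1.toNat)

-- the pair A emits for a duplicate at position p
def ldEmit (seq : List Int) (p : Int × Int) : List Int := [((seq.idxOf p.2 : Nat) : Int), p.1]

theorem index?_eq_some_idxOf (l : List Int) (x : Int) (h : x ∈ l) :
    PySem.List.index? l x = some (l.idxOf x) := by
  induction l with
  | nil => simp at h
  | cons y t ih =>
    by_cases hy : y = x
    · subst hy; rw [PySem.List.index?_cons_self]; simp
    · rw [PySem.List.index?_cons_of_ne t hy]
      have hx : x ∈ t := by simpa [Ne.symm hy] using h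
      rw [ih hx]
      simp [hy]

-- A's loop, characterised: it filters the enumerated sequence by 'already seen in the prefix'
-- and maps each survivor to [first index, current index].
theorem A_char (seq : List Int) : ∀ (rest pre seen : List Int) (res : List (List Int)),
    seq = pre ++ rest → (∀ y, y ∈ seen ↔ y ∈ pre) →
    ((PySem.List.enumerate rest (pre.length : Int)).foldl (ldStepA seq) (seen, res)).2
      = res ++ ((PySem.List.enumerate rest (pre.length : Int)).filter (ldC seq)).map (ldEmit seq) := by
  intro rest
  induction rest with
  | nil => intro pre seen res _ _; simp [PySem.List.enumerate]
  | cons x rest ih =>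
    intro pre seen res hseq hseen
    rw [PySem.List.enumerate_cons]
    simp only [List.foldl_cons, List.filter_cons]
    have htake : seq.take ((pre.length : Int)).toNat = pre := by
      rw [hseq]; simp
    have hC : ldC seq ((pre.length : Int), x) = decide (x ∈ pre) := by
      simp only [ldC]
      congr 1
      rw [htake]
    have hlen : ((pre.length : Int) + 1) = (((pre ++ [x]).length : Nat) : Int) := by
      simp only [List.length_append, List.length_cons, List.length_nil]; push_cast; ring
    by_cases hx : x ∈ pre
    · have hxseen : x ∈ seen := (hseen x).mpr hx
      have hxseq : x ∈ seq := by rw [hseq]; exact List.mem_append_left _ hx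
      have hstep : ldStepA seq (seen, res) ((pre.length : Int), x)
          = (seen, res ++ [ldEmit seq ((pre.length : Int), x)]) := by
        unfold ldStepA
        rw [if_neg (by simpa using hxseen), index?_eq_some_idxOf seq x hxseq, ldEmit]
      rw [hstep, hC, if_pos (by simpa using hx)]
      rw [hlen]
      rw [ih (pre ++ [x]) seen (res ++ [ldEmit seq ((pre.length : Int), x)])
        (by simpa using hseq)
        (by intro y; rw [hseen y]; simp; intro hy; subst hy; exact hx)]
      simp
    · have hxseen : x ∉ seen := fun h => hx ((hseen x).mp h)
      have hstep : ldStepA seq (seen, res) ((pre.length : Int), x) = (seen ++ [x], res) := by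
        simp [ldStepA, hxseen]
      rw [hstep, hC, if_neg (by simpa using hx)]
      rw [hlen]
      exact ih (pre ++ [x]) (seen ++ [x]) res (by simpa using hseq)
        (by intro y; simp [hseen y])

-- shape of one occurrence group: its first element carries the first-occurrence index
theorem G_shape : ∀ (l : List Int) (s x : Int), x ∈ l →
    ∃ t, (PySem.List.enumerate l s).filter (fun p => p.2 == x)
      = (s + (l.idxOf x : Int), x) :: t := by
  intro l
  induction l with
  | nil => intro s x h; simp at h
  | cons y ys ih =>
    intro s x h
    rw [PySem.List.enumerate_cons]
    by_cases hy : y = x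
    · subst hy
      refine ⟨(PySem.List.enumerate ys (s+1)).filter (fun p => p.2 == y), ?_⟩
      simp
    · have hx : x ∈ ys := by simpa [Ne.symm hy] using h
      obtain ⟨t, ht⟩ := ih (s+1) x hx
      refine ⟨t, ?_⟩
      rw [List.filter_cons, if_neg (by simp [hy]), ht, List.idxOf_cons_ne _ hy]
      congr 2
      push_cast
      ring

-- B's per-group pair comprehension produces exactly A's pairs of that group
theorem group_emit (seq : List Int) (x : Int) (hx : x ∈ seq) :
    (((PySem.List.enumerate seq 0).filter (fun p => p.2 == x)).filter (ldC seq)).map (ldEmit seq)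
      = (PySem.List.slice (((PySem.List.enumerate seq 0).filter (fun p => p.2 == x)).map (·.1)) (some 1) none).map
          (fun j => [PySem.List.pyGetD (((PySem.List.enumerate seq 0).filter (fun p => p.2 == x)).map (·.1)) 0 0, j]) := by
  obtain ⟨t, ht⟩ := G_shape seq 0 x hx
  rw [zero_add] at ht
  have hpair : (((PySem.List.enumerate seq 0).filter (fun p => p.2 == x))).Pairwise (fun p q => p.1 < q.1) :=
    (PySem.List.pairwise_lt_enumerate seq 0).filter _
  rw [ht] at hpair
  have hlt : ∀ p ∈ t, ((seq.idxOf x : Nat) : Int) < p.1 := by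
    intro p hp
    exact (List.pairwise_cons.mp hpair).1 p hp
  have hmem : ∀ p ∈ t, p.2 = x ∧ ∃ k : Nat, k < seq.length ∧ p.1 = (k : Int) := by
    intro p hp
    have hpG : p ∈ (PySem.List.enumerate seq 0).filter (fun p => p.2 == x) := by
      rw [ht]; exact List.mem_cons_of_mem _ hp
    have h1 := List.mem_filter.mp hpG
    obtain ⟨k, hk, hpk⟩ := (PySem.List.mem_enumerate_iff seq 0 p).mp h1.1
    refine ⟨by simpa using h1.2, k, hk, by rw [hpk]; simp⟩
  have hCt : ∀ p ∈ t, ldC seq p = true := by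
    intro p hp
    obtain ⟨hp2, k, hk, hp1⟩ := hmem p hp
    have hik : seq.idxOf x < k := by
      have := hlt p hp; rw [hp1] at this; exact_mod_cast this
    simp only [ldC, hp1, hp2, Int.toNat_natCast]
    exact decide_eq_true ((List.mem_take_iff_idxOf_lt hx).mpr hik)
  have hCh : ldC seq (((seq.idxOf x : Nat) : Int), x) = false := by
    simp only [ldC, Int.toNat_natCast]
    simp [List.mem_take_iff_idxOf_lt hx]
  rw [ht, List.filter_cons, if_neg (by simp [hCh]), List.filter_eq_self.mpr hCt]
  rw [List.map_cons, PySem.List.slice_from_one, List.tail_cons, PySem.List.pyGetD_zero_cons]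
  rw [List.map_map]
  apply List.map_congr_left
  intro p hp
  obtain ⟨hp2, _, _, _⟩ := hmem p hp
  simp [ldEmit, hp2, Function.comp]

-- group-by permutation: a list is a permutation of its groups, one per distinct key
theorem perm_flatMap_filter {α κ : Type} [DecidableEq κ] (key : α → κ) :
    ∀ (K : List κ) (l : List α), K.Nodup → (∀ b ∈ l, key b ∈ K) →
    l.Perm (K.flatMap (fun k => l.filter (fun b => key b == k))) := by
  intro K
  induction K with
  | nil =>
    intro l _ hcov
    cases l with
    | nil => simp
    | cons a t => exact absurd (hcov a (by simp)) (by simp)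
  | cons k K' ih =>
    intro l hnd hcov
    have hperm1 : l.Perm (l.filter (fun b => key b == k) ++ l.filter (fun b => !(key b == k))) :=
      (List.filter_append_perm _ l).symm
    have hcov' : ∀ b ∈ l.filter (fun b => !(key b == k)), key b ∈ K' := by
      intro b hb
      have hb' := List.mem_filter.mp hb
      rcases List.mem_cons.mp (hcov b hb'.1) with h | h
      · simp [h] at hb'
      · exact h
    have ih' := ih (l.filter (fun b => !(key b == k))) hnd.of_cons hcov'
    have heq : (K'.flatMap (fun k' => (l.filter (fun b => !(key b == k))).filter (fun b => key b == k')))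
        = K'.flatMap (fun k' => l.filter (fun b => key b == k')) := by
      apply List.flatMap_congr
      intro k' hk'
      have hne : k' ≠ k := by rintro rfl; exact (List.nodup_cons.mp hnd).1 hk'
      rw [List.filter_filter]
      apply List.filter_congr
      intro b _
      by_cases hb : key b = k'
      · simp [hb, hne]
      · simp [hb]
    rw [List.flatMap_cons]
    exact hperm1.trans (List.Perm.append_left _ (heq ▸ ih'))

theorem list_duplicates_eq : ∀ seq, list_duplicates seq = list_duplicates_alt seq := by
  intro seq
  have hA : list_duplicates seq
      = ((PySem.List.enumerate seq 0).filter (ldC seq)).map (ldEmit seq) := by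
    have h := A_char seq seq [] [] [] (by simp) (by simp)
    unfold list_duplicates
    simpa using h
  -- B side characterisation
  simp only [list_duplicates_alt]
  set occ := (PySem.List.enumerate seq 0).foldl
    (fun d p => d.modify p.2 [] (· ++ [p.1])) (PySem.Dict.empty : PySem.Dict Int (List Int)) with hocc
  have hkeys : occ.keys = PySem.Set.ofList seq := by
    rw [hocc]
    rw [PySem.Dict.keys_foldl_modify_key (PySem.List.enumerate seq 0) (fun p => p.2) []
      (fun d p v => v ++ [p.1]) PySem.Dict.empty]
    rw [PySem.List.map_snd_enumerate]
    simp [PySem.Set.update_nil_left]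
  have hnodup : occ.keys.Nodup := by
    rw [hocc]
    exact PySem.Dict.nodup_keys_foldl_modify_key (PySem.List.enumerate seq 0)
      (fun p : Int × Int => p.2) []
      (fun (d : PySem.Dict Int (List Int)) (p : Int × Int) (v : List Int) => v ++ [p.1])
      PySem.Dict.empty (by simp)
  have hgetD : ∀ x : Int, occ.getD x []
      = ((PySem.List.enumerate seq 0).filter (fun p => p.2 == x)).map (·.1) := by
    intro x
    have h1 : occ = ((PySem.List.enumerate seq 0).map Prod.swap).foldl
        (fun d q => d.modify q.1 [] (· ++ [q.2])) PySem.Dict.empty := by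
      rw [hocc, List.foldl_map]
      rfl
    rw [h1, PySem.Dict.getD_foldl_modify_append]
    rw [List.filter_map, List.map_map]
    rfl
  have hvalues : occ.values = (PySem.Set.ofList seq).map (fun k => occ.getD k []) := by
    rw [PySem.Dict.values_eq_map_keys occ hnodup [], hkeys]
  rw [hvalues, List.flatMap_map]
  -- permutation between A's list and B's unsorted pairs
  have hcov : ∀ b ∈ (PySem.List.enumerate seq 0).filter (ldC seq),
      b.2 ∈ PySem.Set.ofList seq := by
    intro b hb
    have hb' := (List.mem_filter.mp hb).1
    obtain ⟨k, hk, hbk⟩ := (PySem.List.mem_enumerate_iff seq 0 b).mp hb'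
    rw [PySem.Set.mem_ofList]
    rw [hbk]
    exact List.getElem_mem hk
  have hperm0 := perm_flatMap_filter (fun p : Int × Int => p.2) (PySem.Set.ofList seq)
    ((PySem.List.enumerate seq 0).filter (ldC seq)) (PySem.Set.nodup_ofList seq) hcov
  have hgroups : ∀ x ∈ PySem.Set.ofList seq,
      (((PySem.List.enumerate seq 0).filter (ldC seq)).filter (fun b => b.2 == x)).map (ldEmit seq)
        = (PySem.List.slice (occ.getD x []) (some 1) none).map
            (fun j => [PySem.List.pyGetD (occ.getD x []) 0 0, j]) := by
    intro x hxK
    have hx : x ∈ seq := (PySem.Set.mem_ofList seq x).mp hxK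
    have hcomm : ((PySem.List.enumerate seq 0).filter (ldC seq)).filter (fun b => b.2 == x)
        = ((PySem.List.enumerate seq 0).filter (fun p => p.2 == x)).filter (ldC seq) := by
      rw [List.filter_filter, List.filter_filter]
      apply List.filter_congr
      intro b _
      rw [Bool.and_comm]
    rw [hcomm, hgetD x]
    exact group_emit seq x hx
  have hFperm : (((PySem.List.enumerate seq 0).filter (ldC seq)).map (ldEmit seq)).Perm
      ((PySem.Set.ofList seq).flatMap (fun x =>
        (PySem.List.slice (occ.getD x []) (some 1) none).map
          (fun j => [PySem.List.pyGetD (occ.getD x []) 0 0, j]))) := by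
    have h1 := hperm0.map (ldEmit seq)
    rw [List.map_flatMap] at h1
    refine h1.trans (List.Perm.of_eq ?_)
    exact List.flatMap_congr hgroups
  have hpw : (((PySem.List.enumerate seq 0).filter (ldC seq)).map (ldEmit seq)).Pairwise
      (fun a b => PySem.List.pyGetD a 1 0 < PySem.List.pyGetD b 1 0) := by
    apply List.pairwise_map.mpr
    apply ((PySem.List.pairwise_lt_enumerate seq 0).filter (ldC seq)).imp
    intro p q h
    exact h
  rw [hA]
  exact (PySem.List.sorted_eq_of_perm_of_pairwise_lt _ _ _ hFperm hpw).symm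

-- ===== VERDICT (by name: the statement is the Claim_ definition above) =====
theorem list_duplicates_spec : Claim_equal_list_duplicates := by
  intro seq _
  exact list_duplicates_eq seq
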